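-- pv_equiv track=rewrite | github.com/mahanshi/BP-Project | Code/Final version/txt_to_json.py | find_out
-- ===== SOURCE A (Python) =====
-- def find_out(s, x):
--     k = 0
--     for (a, i) in enumerate(s):
--         if k == 0 and i == x:
--             return a
--         k += (i == '(')
--         k -= (i == ')')
--     return -1
-- ===== SOURCE B (Python) =====
-- def find_out(s, x):
--     candidates = [a for a, c in enumerate(s) if c == x]
--     for a in candidates:
--         if s.count('(', 0, a) == s.count(')', 0, a):
--             return a
--     return -1
-- ===== Notes on version B (the rewrite author's own statement) =====
-- stated objective: alternative
-- what changed: Replaces A's single pass with a maintained depth counter by two staged passes: first collect all indices whose character equals x, then scan those candidates and return the first one whose prefix has equally many '(' and ')' (counted afresh per candidate).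
import Mathlib
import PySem

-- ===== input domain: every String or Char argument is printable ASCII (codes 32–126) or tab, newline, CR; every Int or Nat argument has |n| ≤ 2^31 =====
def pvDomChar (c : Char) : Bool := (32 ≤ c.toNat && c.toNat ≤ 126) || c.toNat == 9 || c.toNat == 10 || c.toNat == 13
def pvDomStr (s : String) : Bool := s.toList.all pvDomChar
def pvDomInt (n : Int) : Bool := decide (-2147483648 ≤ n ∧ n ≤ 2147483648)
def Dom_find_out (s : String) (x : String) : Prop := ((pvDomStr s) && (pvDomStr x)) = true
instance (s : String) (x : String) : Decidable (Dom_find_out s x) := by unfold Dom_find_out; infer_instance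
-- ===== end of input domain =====

-- B drops A's running depth counter: it first collects the candidate indices whose
-- character equals x, then returns the first candidate whose prefix is balanced
-- (objective: alternative decomposition, two staged passes instead of one counting pass).

-- ===== PORT A =====
-- A's enumerate-loop: index a, remaining chars l, running depth k
def find_out_go (xs : List Char) (a : Nat) (l : List Char) (k : Int) : Int :=
  match l with
  | [] => -1
  | c :: rest =>
      if k = 0 ∧ [c] = xs then (a : Int)
      else find_out_go xs (a + 1) rest
        (k + (if c = '(' then 1 else 0) - (if c = ')' then 1 else 0))

def find_out (s : String) (x : String) : Int :=
  find_out_go x.toList 0 s.toList 0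

-- ===== PORT B =====
-- B's second pass: walk the candidate indices, return the first with a balanced prefix
def find_out_alt_loop (cs : List Char) (l : List Int) : Int :=
  match l with
  | [] => -1
  | a :: rest =>
      if (cs.take a.toNat).count '(' = (cs.take a.toNat).count ')' then a
      else find_out_alt_loop cs rest

def find_out_alt (s : String) (x : String) : Int :=
  let cs := s.toList
  let candidates := ((PySem.List.enumerate cs).filter (fun p => [p.2] = x.toList)).map (·.1)
  find_out_alt_loop cs candidates

-- ===== PRECONDITION & SPEC =====
def Spec_find_out (s : String) (x : String) (out : Int) : Prop := out = find_out_alt s x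
instance (s : String) (x : String) (out : Int) : Decidable (Spec_find_out s x out) := by unfold Spec_find_out; infer_instance

-- ===== CLAIM =====
def Claim_equal_find_out : Prop := ∀ (s : String) (x : String), Dom_find_out s x → Spec_find_out s x (find_out s x)

-- ===== LEMMAS AND PROOFS =====

theorem go_eq (xs : List Char) (suf : List Char) :
    ∀ pre : List Char,
      find_out_go xs pre.length suf
          ((pre.count '(' : Int) - (pre.count ')' : Int))
        = find_out_alt_loop (pre ++ suf)
            (((PySem.List.enumerate suf (pre.length : Int)).filter
                (fun p => [p.2] = xs)).map (·.1)) := by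
  induction suf with
  | nil => intro pre; simp [find_out_go, PySem.List.enumerate, find_out_alt_loop]
  | cons c rest ih =>
      intro pre
      have htake : (pre ++ c :: rest).take pre.length = pre := by simp
      rw [PySem.List.enumerate_cons]
      by_cases hc : [c] = xs
      · -- candidate kept by the filter
        rw [List.filter_cons_of_pos (by simpa using hc)]
        simp only [List.map_cons, find_out_alt_loop, find_out_go]
        have htn : ((pre.length : Int)).toNat = pre.length := by simp
        rw [htn, htake]
        by_cases hb : pre.count '(' = pre.count ')'
        · rw [if_pos ⟨by omega, hc⟩, if_pos hb]
        · rw [if_neg (fun h => hb (by omega)), if_neg hb]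
          have hk : ((pre.count '(' : Int) - (pre.count ')' : Int)
                + (if c = '(' then 1 else 0)) - (if c = ')' then 1 else 0)
              = (((pre ++ [c]).count '(' : Int) - ((pre ++ [c]).count ')' : Int)) := by
            by_cases h1 : c = '(' <;> by_cases h2 : c = ')' <;>
              simp [List.count_append, h1, h2] <;> omega
          have := ih (pre ++ [c])
          have hlen : (pre ++ [c]).length = pre.length + 1 := by simp
          have harr : ((pre ++ [c]) ++ rest) = pre ++ c :: rest := by simp
          rw [hlen, harr] at this
          rw [hk]
          push_cast at this ⊢
          exact this
      · -- candidate dropped by the filter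
        rw [List.filter_cons_of_neg (by simpa using hc)]
        simp only [find_out_go]
        rw [if_neg (fun h => hc h.2)]
        have hk : ((pre.count '(' : Int) - (pre.count ')' : Int)
              + (if c = '(' then 1 else 0)) - (if c = ')' then 1 else 0)
            = (((pre ++ [c]).count '(' : Int) - ((pre ++ [c]).count ')' : Int)) := by
          by_cases h1 : c = '(' <;> by_cases h2 : c = ')' <;>
            simp [List.count_append, h1, h2] <;> omega
        have := ih (pre ++ [c])
        have hlen : (pre ++ [c]).length = pre.length + 1 := by simp
        have harr : ((pre ++ [c]) ++ rest) = pre ++ c :: rest := by simp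
        rw [hlen, harr] at this
        rw [hk]
        push_cast at this ⊢
        exact this

-- ===== VERDICT =====
theorem find_out_spec : Claim_equal_find_out := by
  intro s x _
  unfold Spec_find_out find_out find_out_alt
  simpa using go_eq x.toList s.toList []
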